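-- pv_equiv track=rewrite | github.com/myampols/Square-Free-Sequence-Code | count-squarefree-words.py | allSquarefreeWords
-- ===== SOURCE A (Python) =====
-- def squareAtLastChar(s):
--   for suffixLength in range(2, len(s)+1, 2):
--     suffix = s[len(s)-suffixLength:]
--     if suffix[0:suffixLength//2] == suffix[suffixLength//2:]:
--       return True
--   return False
--
-- def allSquarefreeWords(currentString, constraints):
--   if len(currentString) == len(constraints):
--     return 1
--   characterPossibilities = constraints[len(currentString)]
--   sum = 0
--   for c in characterPossibilities:
--     if not squareAtLastChar(currentString+c):
--       sum += allSquarefreeWords(currentString+c, constraints)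
--   return sum
-- ===== SOURCE B (Python) =====
-- def _hasSquareTail(s):
--     n = len(s)
--     return any(s[n - k:] == s[n - 2 * k:n - k] for k in range(1, n // 2 + 1))
--
-- def allSquarefreeWords(currentString, constraints):
--     frontier = [currentString]
--     for chars in constraints[len(currentString):]:
--         frontier = [w + c for w in frontier
--                     for c in chars
--                     if not _hasSquareTail(w + c)]
--     return len(frontier)
-- ===== Notes on version B (the rewrite author's own statement) =====
-- stated objective: alternative
-- what changed: Replaces A's depth-first recursion that sums subtree counts (testing every even suffix length for a square) with an iterative breadth-first frontier that materialises all squarefree extensions level by level and returns the final frontier's size, the square test comparing the last k characters against the preceding k for each k.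
import Mathlib
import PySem

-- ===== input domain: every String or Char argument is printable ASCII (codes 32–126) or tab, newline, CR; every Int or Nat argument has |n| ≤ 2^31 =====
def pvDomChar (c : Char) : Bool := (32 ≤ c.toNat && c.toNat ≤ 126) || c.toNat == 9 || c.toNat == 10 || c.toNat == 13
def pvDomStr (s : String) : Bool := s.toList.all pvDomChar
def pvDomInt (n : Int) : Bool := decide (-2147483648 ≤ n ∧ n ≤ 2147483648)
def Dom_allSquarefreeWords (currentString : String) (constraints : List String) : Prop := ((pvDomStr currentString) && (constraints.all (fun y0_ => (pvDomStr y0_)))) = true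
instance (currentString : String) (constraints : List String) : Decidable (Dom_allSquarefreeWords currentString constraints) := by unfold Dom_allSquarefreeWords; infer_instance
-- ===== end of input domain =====

-- B replaces A's depth-first recursion (summing subtree counts, testing every even suffix
-- length) by an iterative breadth-first frontier of all squarefree extensions, with the
-- square test comparing the last k characters against the preceding k; same return value.

-- ===== PORT A =====
def pvSquareAtLastChar (s : List Char) : Bool :=
  (PySem.List.pyRange 2 ((s.length : Int) + 1) 2).any (fun suffixLength =>
    let suffix := PySem.List.slice s (some ((s.length : Int) - suffixLength)) none
    PySem.List.slice suffix (some 0) (some (PySem.Int.floordiv suffixLength 2)) ==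
      PySem.List.slice suffix (some (PySem.Int.floordiv suffixLength 2)) none)

-- fuel only guards totality: constraints.length + 1 levels always suffice under Pre_
def pvCountA : Nat → List Char → List String → Int
  | 0, _, _ => 0
  | fuel + 1, w, cs =>
    if w.length = cs.length then 1
    else
      match PySem.List.pyGet? cs (w.length : Int) with
      | none => 0   -- Python raises IndexError here; excluded by Pre_
      | some poss =>
          poss.toList.foldl
            (fun acc c => if !pvSquareAtLastChar (w ++ [c]) then acc + pvCountA fuel (w ++ [c]) cs else acc) 0

def allSquarefreeWords (currentString : String) (constraints : List String) : Int :=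
  pvCountA (constraints.length + 1) currentString.toList constraints

-- ===== PORT B =====
def pvHasSquareTail (s : List Char) : Bool :=
  (PySem.List.pyRange 1 (PySem.Int.floordiv (s.length : Int) 2 + 1) 1).any (fun k =>
    PySem.List.slice s (some ((s.length : Int) - k)) none ==
      PySem.List.slice s (some ((s.length : Int) - 2 * k)) (some ((s.length : Int) - k)))

def pvStep (fr : List (List Char)) (chars : List Char) : List (List Char) :=
  fr.flatMap (fun w => (chars.filter (fun c => !pvHasSquareTail (w ++ [c]))).map (fun c => w ++ [c]))

def allSquarefreeWords_alt (currentString : String) (constraints : List String) : Int :=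
  (((PySem.List.slice constraints (some (PySem.Str.len currentString)) none).foldl
      (fun fr chars => pvStep fr chars.toList) [currentString.toList]).length : Int)

-- ===== PRECONDITION & SPEC =====
-- Pre_ excludes exactly the inputs where A raises IndexError: a prefix longer than the constraint list
def Pre_allSquarefreeWords (currentString : String) (constraints : List String) : Prop :=
  currentString.toList.length ≤ constraints.length
instance (currentString : String) (constraints : List String) : Decidable (Pre_allSquarefreeWords currentString constraints) := by unfold Pre_allSquarefreeWords; infer_instance

def pvWitness_allSquarefreeWords : String × List String := ("", ["ab", "ba"])

def Spec_allSquarefreeWords (currentString : String) (constraints : List String) (out : Int) : Prop := out = allSquarefreeWords_alt currentString constraints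
instance (currentString : String) (constraints : List String) (out : Int) : Decidable (Spec_allSquarefreeWords currentString constraints out) := by unfold Spec_allSquarefreeWords; infer_instance

-- ===== CLAIM (what is proved, stated in full; the proofs are below) =====
def Claim_equal_allSquarefreeWords : Prop := ∀ (currentString : String) (constraints : List String), Dom_allSquarefreeWords currentString constraints → Pre_allSquarefreeWords currentString constraints → Spec_allSquarefreeWords currentString constraints (allSquarefreeWords currentString constraints)

-- ===== LEMMAS AND PROOFS =====

-- A's condition at even length 2k equals B's condition at k
theorem pv_cond_transfer (s : List Char) (k : Int) (h1 : 1 ≤ k) (h2 : 2 * k ≤ (s.length : Int)) :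
    ((PySem.List.slice s (some ((s.length : Int) - k)) none ==
        PySem.List.slice s (some ((s.length : Int) - 2 * k)) (some ((s.length : Int) - k))) = true)
    ↔ ((PySem.List.slice (PySem.List.slice s (some ((s.length : Int) - 2 * k)) none)
          (some 0) (some (PySem.Int.floordiv (2 * k) 2)) ==
        PySem.List.slice (PySem.List.slice s (some ((s.length : Int) - 2 * k)) none)
          (some (PySem.Int.floordiv (2 * k) 2)) none) = true) := by
  obtain ⟨m, rfl⟩ : ∃ m : Nat, k = (m : Int) := ⟨k.toNat, (Int.toNat_of_nonneg (by omega)).symm⟩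
  have hm2 : 2 * m ≤ s.length := by exact_mod_cast h2
  have e1 : (s.length : Int) - m = ((s.length - m : Nat) : Int) := by omega
  have e2 : (s.length : Int) - 2 * m = ((s.length - 2 * m : Nat) : Int) := by omega
  have e3 : PySem.Int.floordiv (2 * (m : Int)) 2 = (m : Int) := by
    rw [PySem.Int.floordiv_eq_ediv_of_pos (by norm_num)]; omega
  rw [e1, e2, e3, PySem.List.slice_from_natCast, PySem.List.slice_natCast,
     PySem.List.slice_from_natCast]
  simp only [PySem.List.slice_zero_start, PySem.List.slice_to_natCast,
     PySem.List.slice_from_natCast]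
  have e4 : s.length - m - (s.length - 2 * m) = m := by omega
  have e5 : s.length - m = (s.length - 2 * m) + m := by omega
  rw [e4, e5, ← List.drop_drop]
  simp only [beq_iff_eq]
  exact eq_comm
theorem pv_sq_eq (s : List Char) : pvHasSquareTail s = pvSquareAtLastChar s := by
  rw [Bool.eq_iff_iff]
  simp only [pvHasSquareTail, pvSquareAtLastChar, List.any_eq_true]
  have hfd : PySem.Int.floordiv (s.length : Int) 2 = ((s.length / 2 : Nat) : Int) := by
    exact_mod_cast PySem.Int.floordiv_natCast s.length 2
  constructor
  · rintro ⟨k, hk, hc⟩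
    rw [PySem.List.mem_pyRange_one, hfd] at hk
    have hkn : 2 * k ≤ (s.length : Int) := by omega
    refine ⟨2 * k, ?_, ?_⟩
    · rw [PySem.List.mem_pyRange_iff_of_pos (by norm_num)]
      exact ⟨by omega, by omega, ⟨k - 1, by ring⟩⟩
    · exact (pv_cond_transfer s k hk.1 hkn).mp hc
  · rintro ⟨L, hL, hc⟩
    rw [PySem.List.mem_pyRange_iff_of_pos (by norm_num)] at hL
    obtain ⟨h2L, hLn, ⟨k, hk⟩⟩ := hL
    have hLeq : L = 2 * (k + 1) := by omega
    rw [hLeq] at hc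
    refine ⟨k + 1, ?_, ?_⟩
    · rw [PySem.List.mem_pyRange_one, hfd]
      omega
    · exact (pv_cond_transfer s (k + 1) (by omega) (by omega)).mpr hc
theorem pv_step_append (fr1 fr2 : List (List Char)) (chars : List Char) :
    pvStep (fr1 ++ fr2) chars = pvStep fr1 chars ++ pvStep fr2 chars := by
  simp [pvStep]

theorem pv_foldB_append (rest : List (List Char)) (fr1 fr2 : List (List Char)) :
    rest.foldl pvStep (fr1 ++ fr2) = rest.foldl pvStep fr1 ++ rest.foldl pvStep fr2 := by
  induction rest generalizing fr1 fr2 with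
  | nil => rfl
  | cons p t ih => simp only [List.foldl_cons, pv_step_append, ih]

theorem pv_foldB_nil (rest : List (List Char)) : rest.foldl pvStep [] = [] := by
  induction rest with
  | nil => rfl
  | cons p t ih => simpa [pvStep] using ih

theorem pv_foldB_length_sum (rest : List (List Char)) (ws : List (List Char)) :
    (rest.foldl pvStep ws).length = (ws.map (fun w => (rest.foldl pvStep [w]).length)).sum := by
  induction ws with
  | nil => simp [pv_foldB_nil]
  | cons w t ih =>
      have : w :: t = [w] ++ t := rfl
      rw [this, pv_foldB_append, List.length_append, ih]
      simp

theorem pv_main (rest : List String) (fuel : Nat) (w : List Char) (cs : List String)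
    (hdrop : cs.drop w.length = rest) (hle : w.length ≤ cs.length) (hfuel : rest.length < fuel) :
    pvCountA fuel w cs = (((rest.map String.toList).foldl pvStep [w]).length : Int) := by
  induction rest generalizing fuel w with
  | nil =>
      obtain ⟨f, rfl⟩ : ∃ f, fuel = f + 1 := ⟨fuel - 1, by omega⟩
      have heq : w.length = cs.length := by
        have := List.drop_eq_nil_iff.mp hdrop
        omega
      simp [pvCountA, heq]
  | cons p rest' ih =>
      obtain ⟨f, rfl⟩ : ∃ f, fuel = f + 1 := ⟨fuel - 1, by omega⟩
      have hlen : cs.length - w.length = rest'.length + 1 := by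
        have := List.length_drop (l := cs) (i := w.length)
        rw [hdrop] at this; simpa using this.symm
      have hlt : w.length < cs.length := by omega
      have hget : PySem.List.pyGet? cs (w.length : Int) = some p := by
        rw [PySem.List.pyGet?_natCast]
        have h0 : cs[w.length]? = (cs.drop w.length)[0]? := by
          simp [List.getElem?_drop]
        rw [h0, hdrop]; rfl
      have hdrop' : cs.drop (w.length + 1) = rest' := by
        rw [← List.tail_drop, hdrop]; rfl
      have hbody : ∀ (acc : Int), ∀ c ∈ p.toList,
          (if !pvSquareAtLastChar (w ++ [c]) then acc + pvCountA f (w ++ [c]) cs else acc) =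
          (if !pvHasSquareTail (w ++ [c]) then acc + (((rest'.map String.toList).foldl pvStep [w ++ [c]]).length : Int) else acc) := by
        intro acc c _
        rw [← pv_sq_eq]
        by_cases hc : pvHasSquareTail (w ++ [c]) = true
        · simp [hc]
        · simp only [Bool.not_eq_true] at hc
          simp only [hc, Bool.not_false, if_pos]
          rw [ih f (w ++ [c]) (by simpa using hdrop') (by simp; omega) (by have := hfuel; simp at this; omega)]
      calc pvCountA (f + 1) w cs
          = p.toList.foldl (fun acc c => if !pvHasSquareTail (w ++ [c]) then acc + (((rest'.map String.toList).foldl pvStep [w ++ [c]]).length : Int) else acc) 0 := by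
            simp only [pvCountA, if_neg (by omega : ¬ w.length = cs.length), hget]
            exact PySem.List.foldl_congr_mem _ _ _ _ hbody
        _ = (((p :: rest').map String.toList).foldl pvStep [w]).length := by
            rw [PySem.List.foldl_if_eq_foldl_filter (p := fun c => !pvHasSquareTail (w ++ [c]))
                  (f := fun acc c => acc + (((rest'.map String.toList).foldl pvStep [w ++ [c]]).length : Int))]
            rw [PySem.List.foldl_add]
            simp only [List.map_cons, List.foldl_cons]
            have hstep : pvStep [w] p.toList =
                (p.toList.filter (fun c => !pvHasSquareTail (w ++ [c]))).map (fun c => w ++ [c]) := by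
              simp [pvStep]
            rw [hstep, pv_foldB_length_sum, List.map_map, Nat.cast_list_sum, List.map_map]
            simp [Function.comp_def]
theorem allSquarefreeWords_spec : Claim_equal_allSquarefreeWords := by
  intro s cs _ hpre
  unfold Spec_allSquarefreeWords allSquarefreeWords allSquarefreeWords_alt
  rw [PySem.Str.len_eq, PySem.List.slice_from_natCast, ← List.foldl_map]
  refine pv_main (cs.drop s.toList.length) (cs.length + 1) s.toList cs rfl hpre ?_
  have := List.length_drop (l := cs) (i := s.toList.length)
  omega
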